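-- pv_equiv track=rewrite | github.com/QuangChinhDE/appbi-ai | backend/app/services/sql_validator.py | _has_multiple_statements
-- ===== SOURCE A (Python) =====
-- def _has_multiple_statements(sql_query: str) -> bool:
--     """
--     Check if SQL contains multiple statements.
--     Allows trailing semicolon but rejects semicolon followed by more SQL.
--     """
--     # Find all semicolons
--     parts = sql_query.split(';')
--
--     # If only one part, no semicolon present
--     if len(parts) <= 1:
--         return False
--
--     # Check if anything after the first semicolon is non-whitespace
--     for part in parts[1:]:
--         if part.strip():  # Non-empty after semicolon
--             return True
--
--     return False
-- ===== SOURCE B (Python) =====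
-- def _has_multiple_statements(sql_query: str) -> bool:
--     # Strip trailing semicolons/whitespace; any semicolon left has real SQL after it.
--     remainder = sql_query.rstrip("; \t\n\r\v\f")
--     return ';' in remainder
-- ===== Notes on version B (the rewrite author's own statement) =====
-- stated objective: simpler
-- what changed: Instead of splitting the query on semicolons and scanning the tail parts with strip() in a loop, B strips trailing whitespace/semicolons once and tests whether a semicolon remains.
import Mathlib
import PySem

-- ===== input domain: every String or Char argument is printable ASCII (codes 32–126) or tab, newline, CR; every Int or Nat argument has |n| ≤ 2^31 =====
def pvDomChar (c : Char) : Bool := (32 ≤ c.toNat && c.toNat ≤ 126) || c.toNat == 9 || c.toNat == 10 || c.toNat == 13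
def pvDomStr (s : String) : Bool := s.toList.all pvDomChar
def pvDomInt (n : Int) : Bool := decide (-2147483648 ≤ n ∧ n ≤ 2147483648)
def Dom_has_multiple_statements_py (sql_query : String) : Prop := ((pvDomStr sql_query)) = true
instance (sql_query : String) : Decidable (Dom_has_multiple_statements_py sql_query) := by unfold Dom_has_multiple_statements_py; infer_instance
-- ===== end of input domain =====

-- B replaces A's split-and-scan with one trailing strip plus a membership test (objective: simpler).

-- ===== PORT A =====
def has_multiple_statements_py (sql_query : String) : Bool :=
  -- parts = sql_query.split(';')
  let parts := PySem.Chars.splitOn sql_query.toList [';']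
  -- if len(parts) <= 1: return False
  if parts.length ≤ 1 then false
  else
    -- for part in parts[1:]: if part.strip(): return True / return False
    parts.tail.any (fun part => !(PySem.Chars.strip part).isEmpty)

-- ===== PORT B =====
-- the character set of Source B's rstrip("; \t\n\r\v\f")
def pvTrail (c : Char) : Bool :=
  c == ';' || c == ' ' || c == '\t' || c == '\n' || c == '\r' ||
  c == '\x0b' || c == '\x0c'

def has_multiple_statements_py_alt (sql_query : String) : Bool :=
  -- remainder = sql_query.rstrip("; \t\n\r\v\f") — hand port of rstrip(chars):
  -- drop the trailing characters belonging to the set (exact for rstrip with an explicit char set)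
  let remainder := (sql_query.toList.reverse.dropWhile pvTrail).reverse
  -- return ';' in remainder
  PySem.Chars.isIn [';'] remainder

-- ===== PRECONDITION & SPEC =====
def Spec_has_multiple_statements_py (sql_query : String) (out : Bool) : Prop := out = has_multiple_statements_py_alt sql_query
instance (sql_query : String) (out : Bool) : Decidable (Spec_has_multiple_statements_py sql_query out) := by unfold Spec_has_multiple_statements_py; infer_instance

-- ===== CLAIM (what is proved, stated in full; the proofs are below) =====
def Claim_equal_has_multiple_statements_py : Prop := ∀ (sql_query : String), Dom_has_multiple_statements_py sql_query → Spec_has_multiple_statements_py sql_query (has_multiple_statements_py sql_query)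

-- ===== LEMMAS AND PROOFS =====

-- structural model of sql_query.split(';')
def pvSpl : List Char → List (List Char)
  | [] => [[]]
  | c :: rest => if c = ';' then [] :: pvSpl rest else (pvSpl rest).modifyHead (c :: ·)

theorem pvSpl_ne_nil (cs : List Char) : pvSpl cs ≠ [] := by
  induction cs with
  | nil => simp [pvSpl]
  | cons c rest ih =>
    simp only [pvSpl]
    split_ifs
    · simp
    · cases h : pvSpl rest with
      | nil => exact absurd h ih
      | cons p ps => simp

theorem pvModifyHead_self (l : List (List Char)) :
    List.modifyHead (fun x => x) l = l := by
  cases l <;> simp [List.modifyHead]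

theorem pvSplitOn_go_spec :
    ∀ (fuel : Nat) (l cur : List Char) (acc : List (List Char)),
      l.length < fuel →
      PySem.Chars.splitOn.go [';'] fuel l cur acc =
        acc.reverse ++ (pvSpl l).modifyHead (cur.reverse ++ ·) := by
  intro fuel
  induction fuel with
  | zero => intro l cur acc h; omega
  | succ n ih =>
    intro l cur acc h
    cases l with
    | nil =>
      simp [PySem.Chars.splitOn.go, pvSpl]
    | cons c rest =>
      by_cases hc : c = ';'
      · subst hc
        have hpre : List.isPrefixOf [';'] (';' :: rest) = true := by
          simp [List.isPrefixOf]
        rw [PySem.Chars.splitOn.go, if_pos hpre]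
        have hlen : rest.length < n := by simp at h; omega
        simp only [List.length_cons, List.length_nil, List.drop_succ_cons, List.drop_zero]
        rw [ih rest [] (cur.reverse :: acc) hlen]
        simp [pvSpl, pvModifyHead_self]
      · have hpre : ¬ (List.isPrefixOf [';'] (c :: rest) = true) := by
          simp only [List.isPrefixOf, List.isPrefixOf_nil_left, Bool.and_true, beq_iff_eq]
          exact fun e => hc e.symm
        rw [PySem.Chars.splitOn.go, if_neg hpre]
        rw [ih rest (c :: cur) acc (by simp at h ⊢; omega)]
        simp only [pvSpl, if_neg hc, List.modifyHead_modifyHead]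
        obtain ⟨p, ps, hp⟩ : ∃ p ps, pvSpl rest = p :: ps := by
          cases hx : pvSpl rest with
          | nil => exact absurd hx (pvSpl_ne_nil rest)
          | cons p ps => exact ⟨p, ps, rfl⟩
        simp [hp, List.modifyHead]

theorem pvSplitOn_eq_spl (cs : List Char) :
    PySem.Chars.splitOn cs [';'] = pvSpl cs := by
  show PySem.Chars.splitOn.go [';'] (cs.length + 1) cs [] [] = _
  rw [pvSplitOn_go_spec (cs.length + 1) cs [] [] (by omega)]
  obtain ⟨p, ps, hp⟩ : ∃ p ps, pvSpl cs = p :: ps := by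
    cases hx : pvSpl cs with
    | nil => exact absurd hx (pvSpl_ne_nil cs)
    | cons p ps => exact ⟨p, ps, rfl⟩
  simp [hp, List.modifyHead]

-- strip p is empty iff p is all whitespace
theorem pvStrip_isEmpty (p : List Char) :
    (PySem.Chars.strip p).isEmpty = p.all PySem.Chars.isspace := by
  have key : (PySem.Chars.strip p = []) ↔ (∀ x ∈ p, PySem.Chars.isspace x = true) := by
    constructor
    · intro hnil x hx
      have h1 : ∀ x ∈ List.dropWhile PySem.Chars.isspace p, PySem.Chars.isspace x = true :=
        List.rdropWhile_eq_nil_iff.mp hnil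
      have hsplit := List.takeWhile_append_dropWhile (p := PySem.Chars.isspace) (l := p)
      rw [← hsplit] at hx
      rcases List.mem_append.mp hx with hx | hx
      · exact List.mem_takeWhile_imp hx
      · exact h1 x hx
    · intro hall
      have h1 : List.dropWhile PySem.Chars.isspace p = [] :=
        List.dropWhile_eq_nil_iff.mpr hall
      show List.rdropWhile PySem.Chars.isspace (List.dropWhile PySem.Chars.isspace p) = []
      rw [h1]; rfl
  by_cases hall : ∀ x ∈ p, PySem.Chars.isspace x = true
  · rw [List.isEmpty_iff.mpr (key.mpr hall), List.all_eq_true.mpr hall]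
  · have h1 : (PySem.Chars.strip p).isEmpty = false := by
      rw [List.isEmpty_eq_false_iff]
      exact fun hh => hall (key.mp hh)
    have h2 : p.all PySem.Chars.isspace = false := by
      rcases hx : p.all PySem.Chars.isspace with _ | _
      · rfl
      · exact absurd (List.all_eq_true.mp hx) hall
    rw [h1, h2]

-- semicolon-followed-by-content, read from the front
def pvR : List Char → Bool
  | [] => false
  | c :: rest => if c = ';' then rest.any (fun d => !pvTrail d) else pvR rest

theorem pvCharBeq (c d : Char) : (c == d) = decide (c.toNat = d.toNat) := by
  rcases c with ⟨cv, hc⟩; rcases d with ⟨dv, hd⟩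
  simp [BEq.beq, Char.toNat, Char.ext_iff, UInt32.toNat_inj]

theorem pvTrail_dom (c : Char) (h : pvDomChar c = true) :
    pvTrail c = (PySem.Chars.isspace c || c == ';') := by
  have hn : ((32 ≤ c.toNat ∧ c.toNat ≤ 126 ∨ c.toNat = 9) ∨ c.toNat = 10) ∨ c.toNat = 13 := by
    simpa [pvDomChar] using h
  simp only [pvTrail, PySem.Chars.isspace, pvCharBeq]
  rw [Bool.eq_iff_iff]
  simp only [Bool.or_eq_true, Bool.and_eq_true, decide_eq_true_eq,
    show (';').toNat = 59 from rfl, show (' ').toNat = 32 from rfl,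
    show ('\t').toNat = 9 from rfl, show ('\n').toNat = 10 from rfl,
    show ('\r').toNat = 13 from rfl, show ('\x0b').toNat = 11 from rfl,
    show ('\x0c').toNat = 12 from rfl]
  omega

-- A's loop body over the parts of cs equals "cs has a non-trail char"
theorem pvSpl_any (cs : List Char) (h : ∀ c ∈ cs, pvDomChar c = true) :
    (pvSpl cs).any (fun p => !(PySem.Chars.strip p).isEmpty) =
      cs.any (fun c => !pvTrail c) := by
  induction cs with
  | nil => simp [pvSpl, pvStrip_isEmpty]
  | cons c rest ih =>
    have hc := h c (by simp)
    have hrest : ∀ x ∈ rest, pvDomChar x = true := fun x hx => h x (by simp [hx])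
    by_cases hsc : c = ';'
    · subst hsc
      simp only [pvSpl, eq_self_iff_true, if_true, List.any_cons]
      rw [ih hrest]
      have h0 : (!(PySem.Chars.strip ([] : List Char)).isEmpty) = false := by
        simp [pvStrip_isEmpty]
      rw [h0]
      have ht : pvTrail ';' = true := by decide
      simp [ht]
    · obtain ⟨p, ps, hp⟩ : ∃ p ps, pvSpl rest = p :: ps := by
        cases hx : pvSpl rest with
        | nil => exact absurd hx (pvSpl_ne_nil rest)
        | cons p ps => exact ⟨p, ps, rfl⟩
      simp only [pvSpl, if_neg hsc, hp, List.modifyHead, List.any_cons]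
      rw [hp] at ih
      simp only [List.any_cons] at ih ⊢
      have hstrip : (!(PySem.Chars.strip (c :: p)).isEmpty) =
          ((!PySem.Chars.isspace c) || !(PySem.Chars.strip p).isEmpty) := by
        simp [pvStrip_isEmpty]
      rw [hstrip]
      have htc : (!pvTrail c) = (!PySem.Chars.isspace c) := by
        rw [pvTrail_dom c hc]
        simp [beq_iff_eq, hsc]
      rw [← ih hrest, htc]
      cases PySem.Chars.isspace c <;> simp

-- A equals pvR
theorem pvA_eq_R (cs : List Char) (h : ∀ c ∈ cs, pvDomChar c = true) :
    (pvSpl cs).tail.any (fun p => !(PySem.Chars.strip p).isEmpty) = pvR cs := by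
  induction cs with
  | nil => simp [pvSpl, pvR]
  | cons c rest ih =>
    have hrest : ∀ x ∈ rest, pvDomChar x = true := fun x hx => h x (by simp [hx])
    by_cases hsc : c = ';'
    · subst hsc
      simp only [pvSpl, eq_self_iff_true, if_true, List.tail_cons, pvR]
      exact pvSpl_any rest hrest
    · obtain ⟨p, ps, hp⟩ : ∃ p ps, pvSpl rest = p :: ps := by
        cases hx : pvSpl rest with
        | nil => exact absurd hx (pvSpl_ne_nil rest)
        | cons p ps => exact ⟨p, ps, rfl⟩
      simp only [pvSpl, if_neg hsc, hp, List.modifyHead, List.tail_cons, pvR]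
      rw [hp] at ih
      simpa [hsc] using ih hrest

-- cons step of rdropWhile
theorem pvRdrop_cons (p : Char → Bool) (c : Char) (l : List Char) :
    List.rdropWhile p (c :: l) =
      if List.rdropWhile p l = [] then (if p c then [] else [c])
      else c :: List.rdropWhile p l := by
  have hEq : (List.rdropWhile p l = []) ↔ (List.dropWhile p l.reverse = []) := by
    simp [List.rdropWhile]
  by_cases h : List.dropWhile p l.reverse = []
  · rw [if_pos (hEq.mpr h)]
    simp only [List.rdropWhile, List.reverse_cons, List.dropWhile_append, h,
      List.isEmpty_nil, if_true]
    cases hc : p c <;> simp [List.dropWhile_cons, hc]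
  · rw [if_neg (fun hh => h (hEq.mp hh))]
    simp only [List.rdropWhile, List.reverse_cons, List.dropWhile_append,
      List.isEmpty_eq_false_iff.mpr h, Bool.false_eq_true, if_false]
    simp [List.reverse_append]

-- B equals pvR
theorem pvB_eq_R (cs : List Char) :
    decide (';' ∈ List.rdropWhile pvTrail cs) = pvR cs := by
  induction cs with
  | nil => simp [List.rdropWhile, pvR]
  | cons c rest ih =>
    rw [pvRdrop_cons]
    by_cases hnil : List.rdropWhile pvTrail rest = []
    · rw [if_pos hnil]
      have hall : ∀ x ∈ rest, pvTrail x = true := List.rdropWhile_eq_nil_iff.mp hnil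
      have hany : rest.any (fun d => !pvTrail d) = false := by
        simp only [List.any_eq_false]
        intro x hx; simp [hall x hx]
      by_cases hsc : c = ';'
      · subst hsc
        have ht : pvTrail ';' = true := by decide
        simp [pvR, hany, ht]
      · simp only [pvR, if_neg hsc]
        rw [← ih, hnil]
        split_ifs <;> simp [hsc, eq_comm]
    · rw [if_neg hnil]
      obtain ⟨x, hx, hpx⟩ : ∃ x ∈ rest, ¬ pvTrail x = true := by
        by_contra hcon
        push_neg at hcon
        exact hnil (List.rdropWhile_eq_nil_iff.mpr hcon)
      have hany : rest.any (fun d => !pvTrail d) = true := by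
        simp only [List.any_eq_true]
        exact ⟨x, hx, by simp [hpx]⟩
      by_cases hsc : c = ';'
      · subst hsc
        simp [pvR, hany]
      · simp only [pvR, if_neg hsc]
        rw [← ih]
        simp [hsc, eq_comm]

-- ===== VERDICT (by name: the statement is the Claim_ definition above) =====
theorem has_multiple_statements_py_spec : Claim_equal_has_multiple_statements_py := by
  intro s hdom
  unfold Spec_has_multiple_statements_py
  unfold has_multiple_statements_py has_multiple_statements_py_alt
  have hdomc : ∀ c ∈ s.toList, pvDomChar c = true := by
    simpa [Dom_has_multiple_statements_py, pvDomStr, List.all_eq_true] using hdom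
  rw [pvSplitOn_eq_spl]
  have hB : PySem.Chars.isIn [';'] ((s.toList.reverse.dropWhile pvTrail).reverse) =
      decide (';' ∈ List.rdropWhile pvTrail s.toList) := by
    have : (s.toList.reverse.dropWhile pvTrail).reverse = List.rdropWhile pvTrail s.toList := rfl
    rw [this]
    rcases hmem : decide (';' ∈ List.rdropWhile pvTrail s.toList) with _ | _
    · simp only [decide_eq_false_iff_not] at hmem
      rcases hin : PySem.Chars.isIn [';'] (List.rdropWhile pvTrail s.toList) with _ | _
      · rfl
      · exfalso
        have := (PySem.Chars.isIn_iff_infix [';'] _).mp hin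
        exact hmem ((List.singleton_infix_iff ';' _).mp this)
    · simp only [decide_eq_true_eq] at hmem
      exact (PySem.Chars.isIn_iff_infix [';'] _).mpr ((List.singleton_infix_iff ';' _).mpr hmem)
  simp only [hB, pvB_eq_R]
  by_cases hlen : (pvSpl s.toList).length ≤ 1
  · rw [if_pos hlen]
    -- tail is empty, so A's any is false; show pvR is false too
    rw [← pvA_eq_R s.toList hdomc]
    obtain ⟨p, ps, hp⟩ : ∃ p ps, pvSpl s.toList = p :: ps := by
      cases hx : pvSpl s.toList with
      | nil => exact absurd hx (pvSpl_ne_nil s.toList)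
      | cons p ps => exact ⟨p, ps, rfl⟩
    rw [hp] at hlen ⊢
    simp at hlen
    simp [hlen]
  · rw [if_neg hlen]
    exact pvA_eq_R s.toList hdomc
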